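-- pv_equiv track=rewrite | github.com/lizabelos/EducnetExtractor | EducnetExtractor.py | findIndentation
-- ===== SOURCE A (Python) =====
-- def findIndentation(str):
--     i = 0
--     for s in str:
--         if s == " ":
--             i = i + 1
--         elif s == "\t":
--             i = i + 4
--         else:
--             break
--     return i
-- ===== SOURCE B (Python) =====
-- from itertools import takewhile
--
-- def findIndentation(str):
--     prefix = "".join(takewhile(lambda c: c == " " or c == "\t", str))
--     return prefix.count(" ") + 4 * prefix.count("\t")
-- ===== Notes on version B (the rewrite author's own statement) =====
-- stated objective: alternative
-- what changed: Replaces the fused accumulate-and-break loop with takewhile prefix extraction followed by two count passes (spaces + 4*tabs).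
import Mathlib
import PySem

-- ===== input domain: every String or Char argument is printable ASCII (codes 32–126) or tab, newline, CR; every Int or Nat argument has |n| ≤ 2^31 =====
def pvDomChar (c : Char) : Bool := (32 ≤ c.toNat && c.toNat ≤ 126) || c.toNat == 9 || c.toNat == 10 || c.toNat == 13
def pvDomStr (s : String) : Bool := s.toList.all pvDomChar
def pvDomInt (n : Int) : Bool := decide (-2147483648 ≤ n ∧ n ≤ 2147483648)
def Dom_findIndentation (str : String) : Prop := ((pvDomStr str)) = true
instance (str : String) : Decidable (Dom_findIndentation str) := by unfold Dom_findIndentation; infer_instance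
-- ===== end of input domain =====

-- B replaces A's fused accumulate-and-break loop by takeWhile prefix extraction + two count passes; return value only, no side effects.
-- ===== PORT A =====
-- the for-loop with break: accumulator i, stop at first non-space/tab
def pvLoopA : List Char → Int → Int
  | [], i => i
  | c :: cs, i =>
    if c = ' ' then pvLoopA cs (i + 1)
    else if c = '\t' then pvLoopA cs (i + 4)
    else i

def findIndentation (str : String) : Int := pvLoopA str.toList 0

-- ===== PORT B =====
def findIndentation_alt (str : String) : Int :=
  let pfx := str.toList.takeWhile (fun c => c == ' ' || c == '\t')
  (pfx.count ' ' : Int) + 4 * (pfx.count '\t' : Int)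

-- ===== PRECONDITION & SPEC =====
def Spec_findIndentation (str : String) (out : Int) : Prop := out = findIndentation_alt str
instance (str : String) (out : Int) : Decidable (Spec_findIndentation str out) := by unfold Spec_findIndentation; infer_instance

-- ===== CLAIM (what is proved, stated in full; the proofs are below) =====
def Claim_equal_findIndentation : Prop := ∀ (str : String), Dom_findIndentation str → Spec_findIndentation str (findIndentation str)

-- ===== LEMMAS AND PROOFS =====

theorem pvLoopA_eq (l : List Char) (i : Int) :
    pvLoopA l i = i + ((l.takeWhile (fun c => c == ' ' || c == '\t')).count ' ' : Int)
      + 4 * ((l.takeWhile (fun c => c == ' ' || c == '\t')).count '\t' : Int) := by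
  induction l generalizing i with
  | nil => simp [pvLoopA]
  | cons c cs ih =>
    by_cases h1 : c = ' '
    · subst h1
      simp [pvLoopA, List.takeWhile, ih]
      ring
    · by_cases h2 : c = '\t'
      · subst h2
        simp [pvLoopA, List.takeWhile, ih]
        ring
      · have e1 : (c == ' ') = false := by simp [h1]
        have e2 : (c == '\t') = false := by simp [h2]
        simp [pvLoopA, List.takeWhile, e1, e2, h1, h2]

-- ===== VERDICT (by name: the statement is the Claim_ definition above) =====
theorem findIndentation_spec : Claim_equal_findIndentation := by
  intro str _
  unfold Spec_findIndentation findIndentation findIndentation_alt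
  rw [pvLoopA_eq]
  ring
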